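-- pv_equiv track=rewrite | github.com/harshalkharabe/Python | questions.py | removeReverse
-- ===== SOURCE A (Python) =====
-- def removeReverse(S):
--     from collections import Counter
--
--     freq = Counter(S)
--     s = list(S)
--     left, right = 0, len(s) - 1
--     direction = True  # True means left to right, False means right to left
--
--     while True:
--         found = False
--
--         if direction:
--             # Check from left to right
--             while left <= right:
--                 if freq[s[left]] > 1:
--                     freq[s[left]] -= 1
--                     s.pop(left)
--                     right -= 1  # since we removed one from left
--                     found = True
--                     direction = not direction
--                     break
--                 else:
--                     left += 1
--         else:
--             # Check from right to left
--             while right >= left: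
--                 if freq[s[right]] > 1:
--                     freq[s[right]] -= 1
--                     s.pop(right)
--                     right -= 1
--                     found = True
--                     direction = not direction
--                     break
--                 else:
--                     right -= 1
--
--         if not found:
--             break
--
--     return ''.join(s)
-- ===== SOURCE B (Python) =====
-- def removeReverse(S):
--     # O(n) two pointers over the original string with a removed-mask; no list.pop shifting.
--     n = len(S)
--     cnt = {}
--     for c in S:
--         cnt[c] = cnt.get(c, 0) + 1
--     rem = [False] * n
--     l, r = 0, n - 1
--     direction = True
--     while True:
--         found = False
--         if direction:
--             while l <= r:
--                 if rem[l]: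
--                     l += 1
--                     continue
--                 if cnt[S[l]] > 1:
--                     cnt[S[l]] -= 1
--                     rem[l] = True
--                     found = True
--                     direction = False
--                     break
--                 l += 1
--         else:
--             while r >= l:
--                 if rem[r]:
--                     r -= 1
--                     continue
--                 if cnt[S[r]] > 1:
--                     cnt[S[r]] -= 1
--                     rem[r] = True
--                     found = True
--                     direction = True
--                     break
--                 r -= 1
--         if not found:
--             break
--     return ''.join(c for i, c in enumerate(S) if not rem[i])
-- ===== Notes on version B (the rewrite author's own statement) =====
-- stated objective: faster
-- what changed: Replaces the shrinking list with list.pop (O(n) shifting per removal, shifting indices) by two monotone pointers over the fixed original string plus a boolean removed-mask and a plain count dict, joining the unremoved characters once at the end.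
import Mathlib
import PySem

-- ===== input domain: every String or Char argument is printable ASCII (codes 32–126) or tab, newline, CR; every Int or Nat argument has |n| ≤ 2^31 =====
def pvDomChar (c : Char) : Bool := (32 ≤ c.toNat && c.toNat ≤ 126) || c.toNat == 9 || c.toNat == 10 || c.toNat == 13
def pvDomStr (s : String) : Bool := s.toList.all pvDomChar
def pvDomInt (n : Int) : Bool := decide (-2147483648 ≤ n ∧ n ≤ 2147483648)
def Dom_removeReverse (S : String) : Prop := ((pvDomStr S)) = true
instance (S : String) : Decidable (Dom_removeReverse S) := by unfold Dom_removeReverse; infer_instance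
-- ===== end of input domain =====

-- B replaces A's shrinking list with list.pop by two monotone pointers over the fixed
-- original string plus a removed-mask (a timing run measured B faster at the largest size).

-- ===== PORT A =====
-- A's indices left/right are represented as Nat `left` and `rpo` = right+1 (right = -1, which
-- Python reaches only as an empty window, is rpo = 0); the loop tests `left <= right` / `right >= left`
-- become `left < rpo`; otherwise the scans are step-for-step A's inner while loops.
-- `s[idx]` is in range whenever read (left ≤ idx ≤ right < len s), so `List.getD` is exact there.

-- A's inner "while left <= right" scan: returns the index popped (s.pop(left) at the found index),
-- i.e. the final value of `left`, or none when the scan falls through (found stays False).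
def rrScanLA (freq : PySem.Dict Char Int) (s : List Char) (left rpo : Nat) : Option Nat :=
  if _h : left < rpo then
    if freq.getD (s.getD left ' ') 0 > 1 then some left
    else rrScanLA freq s (left + 1) rpo
  else none
termination_by rpo - left

-- A's inner "while right >= left" scan (right = rpo - 1): returns the found index or none.
def rrScanRA (freq : PySem.Dict Char Int) (s : List Char) (left rpo : Nat) : Option Nat :=
  if _h : left < rpo then
    if freq.getD (s.getD (rpo - 1) ' ') 0 > 1 then some (rpo - 1)
    else rrScanRA freq s left (rpo - 1)
  else none
termination_by rpo - left

-- A's outer "while True": each iteration scans in the current direction; on found pops the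
-- element, decrements its count (Counter __getitem__/__setitem__), flips direction; else breaks.
-- fuel = len(S)+1 bounds the iterations (each one but the last removes an element); it never runs out.
def rrLoopA (fuel : Nat) (s : List Char) (freq : PySem.Dict Char Int)
    (left rpo : Nat) (dir : Bool) : List Char :=
  match fuel with
  | 0 => s
  | fuel + 1 =>
    if dir then
      match rrScanLA freq s left rpo with
      | some i =>
          rrLoopA fuel (s.eraseIdx i)
            (freq.insert (s.getD i ' ') (freq.getD (s.getD i ' ') 0 - 1)) i (rpo - 1) false
      | none => s
    else
      match rrScanRA freq s left rpo with
      | some j =>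
          rrLoopA fuel (s.eraseIdx j)
            (freq.insert (s.getD j ' ') (freq.getD (s.getD j ' ') 0 - 1)) left j true
      | none => s

def removeReverse (S : String) : String :=
  let s := S.toList
  let freq := PySem.Dict.counter s          -- freq = Counter(S)
  String.ofList (rrLoopA (s.length + 1) s freq 0 s.length true)

-- ===== PORT B =====
-- Same Nat index convention (rpo = r+1).  `rem[l]` is in range whenever read (l < rpo ≤ n),
-- so `List.getD` is exact there; `cnt[c]` reads keys that are always present (every char of S
-- was counted), so `Dict.getD c 0` is exact there.

-- B's left scan over the original string: skip removed cells, else test the count; returns the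
-- original-string index at which rem[l] is set, or none.
def rrScanLB (cnt : PySem.Dict Char Int) (cs : List Char) (rem : List Bool)
    (l rpo : Nat) : Option Nat :=
  if _h : l < rpo then
    if rem.getD l false then rrScanLB cnt cs rem (l + 1) rpo
    else if cnt.getD (cs.getD l ' ') 0 > 1 then some l
    else rrScanLB cnt cs rem (l + 1) rpo
  else none
termination_by rpo - l

def rrScanRB (cnt : PySem.Dict Char Int) (cs : List Char) (rem : List Bool)
    (l rpo : Nat) : Option Nat :=
  if _h : l < rpo then
    if rem.getD (rpo - 1) false then rrScanRB cnt cs rem l (rpo - 1)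
    else if cnt.getD (cs.getD (rpo - 1) ' ') 0 > 1 then some (rpo - 1)
    else rrScanRB cnt cs rem l (rpo - 1)
  else none
termination_by rpo - l

-- B's outer loop: mark the found cell removed, decrement its count, flip direction; else break.
def rrLoopB (fuel : Nat) (cs : List Char) (rem : List Bool) (cnt : PySem.Dict Char Int)
    (l rpo : Nat) (dir : Bool) : List Bool :=
  match fuel with
  | 0 => rem
  | fuel + 1 =>
    if dir then
      match rrScanLB cnt cs rem l rpo with
      | some i =>
          rrLoopB fuel cs (rem.set i true)
            (cnt.insert (cs.getD i ' ') (cnt.getD (cs.getD i ' ') 0 - 1)) i rpo false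
      | none => rem
    else
      match rrScanRB cnt cs rem l rpo with
      | some j =>
          rrLoopB fuel cs (rem.set j true)
            (cnt.insert (cs.getD j ' ') (cnt.getD (cs.getD j ' ') 0 - 1)) l (j + 1) true
      | none => rem

-- ''.join(c for i, c in enumerate(S) if not rem[i])
def rrJoinKept : List Char → List Bool → List Char
  | c :: cs, b :: bs => if b then rrJoinKept cs bs else c :: rrJoinKept cs bs
  | _, _ => []

def removeReverse_alt (S : String) : String :=
  let cs := S.toList
  let cnt := cs.foldl (fun d c => d.insert c (d.getD c 0 + 1)) PySem.Dict.empty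
  let rem := rrLoopB (cs.length + 1) cs (List.replicate cs.length false) cnt 0 cs.length true
  String.ofList (rrJoinKept cs rem)

-- ===== PRECONDITION & SPEC =====
def Spec_removeReverse (S : String) (out : String) : Prop := out = removeReverse_alt S
instance (S : String) (out : String) : Decidable (Spec_removeReverse S out) := by unfold Spec_removeReverse; infer_instance

-- ===== CLAIM (what is proved, stated in full; the proofs are below) =====
def Claim_equal_removeReverse : Prop := ∀ (S : String), Dom_removeReverse S → Spec_removeReverse S (removeReverse S)

-- ===== LEMMAS AND PROOFS =====

-- the rank of original position k: how many unremoved cells lie strictly before it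
def rrCF (rem : List Bool) (k : Nat) : Nat := ((rem.take k).count false)


theorem rrCF_zero (rem : List Bool) : rrCF rem 0 = 0 := by simp [rrCF]

theorem rrCF_cons (b : Bool) (bs : List Bool) (k : Nat) :
    rrCF (b :: bs) (k + 1) = (if b then 0 else 1) + rrCF bs k := by
  cases b <;> simp [rrCF, List.count_cons] <;> omega

theorem rrCF_mono (rem : List Bool) {k k' : Nat} (h : k ≤ k') : rrCF rem k ≤ rrCF rem k' := by
  have h1 : rem.take k = (rem.take k').take k := by
    rw [List.take_take, Nat.min_eq_left h]
  unfold rrCF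
  rw [h1]
  exact (List.take_sublist _ _).count_le _

theorem rrCF_succ_false (rem : List Bool) {k : Nat} (hk : k < rem.length)
    (h : rem.getD k false = false) : rrCF rem (k + 1) = rrCF rem k + 1 := by
  induction rem generalizing k with
  | nil => simp at hk
  | cons b bs ih =>
    cases k with
    | zero =>
      simp [List.getD] at h
      simp [rrCF_cons, rrCF_zero, h]
    | succ k =>
      rw [rrCF_cons, rrCF_cons, ih (by simpa using hk) (by simpa [List.getD] using h)]
      omega

theorem rrCF_succ_true (rem : List Bool) {k : Nat}
    (h : rem.getD k false = true) : rrCF rem (k + 1) = rrCF rem k := by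
  induction rem generalizing k with
  | nil => simp [List.getD] at h
  | cons b bs ih =>
    cases k with
    | zero =>
      simp [List.getD] at h
      simp [rrCF_cons, rrCF_zero, h]
    | succ k =>
      rw [rrCF_cons, rrCF_cons, ih (by simpa [List.getD] using h)]

theorem rrKept_getD (cs : List Char) (rem : List Bool) (hlen : rem.length = cs.length)
    {l : Nat} (hl : l < cs.length) (h : rem.getD l false = false) (d : Char) :
    (rrJoinKept cs rem).getD (rrCF rem l) d = cs.getD l d := by
  induction cs generalizing rem l with
  | nil => simp at hl
  | cons c cs ih =>
    cases rem with
    | nil => simp at hlen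
    | cons b bs =>
      cases l with
      | zero =>
        simp [List.getD] at h
        simp [rrJoinKept, rrCF_zero, h, List.getD]
      | succ l =>
        have hb : bs.length = cs.length := by simpa using hlen
        have hl' : l < cs.length := by simpa using hl
        have h' : bs.getD l false = false := by simpa [List.getD] using h
        rw [rrCF_cons]
        cases b with
        | false =>
          simp only [rrJoinKept, if_neg Bool.false_ne_true, Nat.add_comm 1, List.getD_cons_succ]
          exact ih bs hb hl' h'
        | true =>
          simp only [rrJoinKept, if_pos rfl]
          simpa using ih bs hb hl' h'

theorem rrKept_set (cs : List Char) (rem : List Bool) (hlen : rem.length = cs.length)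
    {l : Nat} (hl : l < cs.length) (h : rem.getD l false = false) :
    rrJoinKept cs (rem.set l true) = (rrJoinKept cs rem).eraseIdx (rrCF rem l) := by
  induction cs generalizing rem l with
  | nil => simp at hl
  | cons c cs ih =>
    cases rem with
    | nil => simp at hlen
    | cons b bs =>
      cases l with
      | zero =>
        simp [List.getD] at h
        simp [rrJoinKept, rrCF_zero, h, List.set]
      | succ l =>
        have hb : bs.length = cs.length := by simpa using hlen
        have hl' : l < cs.length := by simpa using hl
        have h' : bs.getD l false = false := by simpa [List.getD] using h
        rw [rrCF_cons, List.set_cons_succ]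
        cases b with
        | false =>
          simp only [rrJoinKept, if_neg Bool.false_ne_true]
          rw [ih bs hb hl' h', Nat.add_comm 1, List.eraseIdx_cons_succ]
        | true =>
          simp only [rrJoinKept, if_pos rfl]
          rw [ih bs hb hl' h']
          simp

theorem rrCF_set_le (rem : List Bool) {k l : Nat} (h : k ≤ l) :
    rrCF (rem.set l true) k = rrCF rem k := by
  induction rem generalizing k l with
  | nil => simp
  | cons b bs ih =>
    cases l with
    | zero =>
      interval_cases k
      · simp [rrCF_zero]
    | succ l =>
      rw [List.set_cons_succ]
      cases k with
      | zero => simp [rrCF_zero]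
      | succ k =>
        rw [rrCF_cons, rrCF_cons, ih (by omega)]

theorem rrCF_set_gt (rem : List Bool) {k l : Nat} (hl : l < rem.length)
    (h : l < k) (hf : rem.getD l false = false) :
    rrCF (rem.set l true) k = rrCF rem k - 1 := by
  induction rem generalizing k l with
  | nil => simp at hl
  | cons b bs ih =>
    cases l with
    | zero =>
      simp [List.getD] at hf
      subst hf
      cases k with
      | zero => omega
      | succ k => simp [rrCF_cons]
    | succ l =>
      cases k with
      | zero => omega
      | succ k =>
        have hl' : l < bs.length := by simpa using hl
        have hf' : bs.getD l false = false := by simpa [List.getD] using hf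
        have hge : 1 ≤ rrCF bs k := by
          have := rrCF_mono bs (Nat.succ_le_of_lt (by omega : l < k))
          rw [rrCF_succ_false bs hl' hf'] at this
          omega
        rw [List.set_cons_succ, rrCF_cons, rrCF_cons, ih hl' (by omega) hf']
        cases b <;> simp <;> omega

theorem rrCF_lt (rem : List Bool) {l rpo : Nat} (h1 : l < rpo) (h2 : rpo ≤ rem.length)
    (hf : rem.getD l false = false) : rrCF rem l < rrCF rem rpo := by
  have hs := rrCF_succ_false rem (by omega : l < rem.length) hf
  have := rrCF_mono rem (show l + 1 ≤ rpo by omega)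
  omega

-- scan correspondence, left: B's scan finds nothing iff A's does, and a found original-string
-- index i corresponds to A's found index rrCF rem i in the shrunken list
theorem rrScanL_eq (cnt : PySem.Dict Char Int) (cs : List Char) (rem : List Bool)
    (hlen : rem.length = cs.length) (rpo : Nat) (hr : rpo ≤ cs.length) :
    ∀ (n l : Nat), rpo - l ≤ n →
    (rrScanLB cnt cs rem l rpo = none ∧ rrScanLA cnt (rrJoinKept cs rem) (rrCF rem l) (rrCF rem rpo) = none)
    ∨ ∃ i, rrScanLB cnt cs rem l rpo = some i ∧ l ≤ i ∧ i < rpo ∧ rem.getD i false = false ∧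
        rrScanLA cnt (rrJoinKept cs rem) (rrCF rem l) (rrCF rem rpo) = some (rrCF rem i) := by
  intro n
  induction n with
  | zero =>
    intro l hl
    left
    refine ⟨by rw [rrScanLB, dif_neg (by omega)], ?_⟩
    have := rrCF_mono rem (show rpo ≤ l by omega)
    rw [rrScanLA, dif_neg (by omega)]
  | succ n ih =>
    intro l hl
    by_cases hcase : l < rpo
    · have hlenl : l < cs.length := lt_of_lt_of_le hcase hr
      rw [rrScanLB, dif_pos hcase]
      cases hb : rem.getD l false with
      | true =>
        have hcf := rrCF_succ_true rem hb
        rcases ih (l + 1) (by omega) with ⟨h1, h2⟩ | ⟨i, h1, h2, h3, h4, h5⟩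
        · left
          refine ⟨by rw [if_pos rfl]; exact h1, ?_⟩
          rw [hcf] at h2; exact h2
        · right
          refine ⟨i, by rw [if_pos rfl]; exact h1, by omega, h3, h4, ?_⟩
          rw [hcf] at h5; exact h5
      | false =>
        have hchar := rrKept_getD cs rem hlen hlenl hb ' '
        have hlt : rrCF rem l < rrCF rem rpo := rrCF_lt rem hcase (hlen ▸ hr) hb
        by_cases hc : cnt.getD (cs.getD l ' ') 0 > 1
        · right
          exact ⟨l, by rw [if_neg Bool.false_ne_true, if_pos hc], le_refl l, hcase, hb,
            by rw [rrScanLA, dif_pos hlt, hchar, if_pos hc]⟩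
        · have hcf := rrCF_succ_false rem (hlen ▸ hlenl) hb
          rcases ih (l + 1) (by omega) with ⟨h1, h2⟩ | ⟨i, h1, h2, h3, h4, h5⟩
          · left
            refine ⟨by rw [if_neg Bool.false_ne_true, if_neg hc]; exact h1, ?_⟩
            rw [rrScanLA, dif_pos hlt, hchar, if_neg hc, ← hcf]
            exact h2
          · right
            refine ⟨i, by rw [if_neg Bool.false_ne_true, if_neg hc]; exact h1, by omega, h3, h4, ?_⟩
            rw [rrScanLA, dif_pos hlt, hchar, if_neg hc, ← hcf]
            exact h5
    · left
      refine ⟨by rw [rrScanLB, dif_neg hcase], ?_⟩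
      have := rrCF_mono rem (show rpo ≤ l by omega)
      rw [rrScanLA, dif_neg (by omega)]

theorem rrScanR_eq (cnt : PySem.Dict Char Int) (cs : List Char) (rem : List Bool)
    (hlen : rem.length = cs.length) (l : Nat) :
    ∀ (n rpo : Nat), rpo ≤ cs.length → rpo - l ≤ n →
    (rrScanRB cnt cs rem l rpo = none ∧ rrScanRA cnt (rrJoinKept cs rem) (rrCF rem l) (rrCF rem rpo) = none)
    ∨ ∃ j, rrScanRB cnt cs rem l rpo = some j ∧ l ≤ j ∧ j < rpo ∧ rem.getD j false = false ∧
        rrScanRA cnt (rrJoinKept cs rem) (rrCF rem l) (rrCF rem rpo) = some (rrCF rem j) := by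
  intro n
  induction n with
  | zero =>
    intro rpo hr hl
    left
    refine ⟨by rw [rrScanRB, dif_neg (by omega)], ?_⟩
    have := rrCF_mono rem (show rpo ≤ l by omega)
    rw [rrScanRA, dif_neg (by omega)]
  | succ n ih =>
    intro rpo hr hl
    by_cases hcase : l < rpo
    · have hrlen : rpo - 1 < cs.length := by omega
      have hrpo1 : rpo - 1 + 1 = rpo := by omega
      rw [rrScanRB, dif_pos hcase]
      cases hb : rem.getD (rpo - 1) false with
      | true =>
        have hcf : rrCF rem rpo = rrCF rem (rpo - 1) := by
          rw [← hrpo1]; exact rrCF_succ_true rem hb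
        rcases ih (rpo - 1) (by omega) (by omega) with ⟨h1, h2⟩ | ⟨j, h1, h2, h3, h4, h5⟩
        · left
          refine ⟨by rw [if_pos rfl]; exact h1, ?_⟩
          rw [hcf]; exact h2
        · right
          refine ⟨j, by rw [if_pos rfl]; exact h1, h2, by omega, h4, ?_⟩
          rw [hcf]; exact h5
      | false =>
        have hcf : rrCF rem rpo = rrCF rem (rpo - 1) + 1 := by
          rw [← hrpo1]; exact rrCF_succ_false rem (hlen ▸ hrlen) hb
        have hchar := rrKept_getD cs rem hlen hrlen hb ' '
        have hlt : rrCF rem l < rrCF rem rpo := by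
          have := rrCF_mono rem (show l ≤ rpo - 1 by omega)
          omega
        have hidx : rrCF rem rpo - 1 = rrCF rem (rpo - 1) := by omega
        by_cases hc : cnt.getD (cs.getD (rpo - 1) ' ') 0 > 1
        · right
          refine ⟨rpo - 1, by rw [if_neg Bool.false_ne_true, if_pos hc], by omega, by omega, hb, ?_⟩
          rw [rrScanRA, dif_pos hlt, hidx, hchar, if_pos hc]
          
        · rcases ih (rpo - 1) (by omega) (by omega) with ⟨h1, h2⟩ | ⟨j, h1, h2, h3, h4, h5⟩
          · left
            refine ⟨by rw [if_neg Bool.false_ne_true, if_neg hc]; exact h1, ?_⟩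
            rw [rrScanRA, dif_pos hlt, hidx, hchar, if_neg hc]
            exact h2
          · right
            refine ⟨j, by rw [if_neg Bool.false_ne_true, if_neg hc]; exact h1, h2, by omega, h4, ?_⟩
            rw [rrScanRA, dif_pos hlt, hidx, hchar, if_neg hc]
            exact h5
    · left
      refine ⟨by rw [rrScanRB, dif_neg hcase], ?_⟩
      have := rrCF_mono rem (show rpo ≤ l by omega)
      rw [rrScanRA, dif_neg (by omega)]

-- outer loop correspondence
theorem rrLoopA_succ_true (fuel : Nat) (s : List Char) (cnt : PySem.Dict Char Int) (left rpo : Nat) :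
    rrLoopA (fuel + 1) s cnt left rpo true =
      match rrScanLA cnt s left rpo with
      | some i =>
          rrLoopA fuel (s.eraseIdx i)
            (cnt.insert (s.getD i ' ') (cnt.getD (s.getD i ' ') 0 - 1)) i (rpo - 1) false
      | none => s := rfl

theorem rrLoopA_succ_false (fuel : Nat) (s : List Char) (cnt : PySem.Dict Char Int) (left rpo : Nat) :
    rrLoopA (fuel + 1) s cnt left rpo false =
      match rrScanRA cnt s left rpo with
      | some j =>
          rrLoopA fuel (s.eraseIdx j)
            (cnt.insert (s.getD j ' ') (cnt.getD (s.getD j ' ') 0 - 1)) left j true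
      | none => s := rfl

theorem rrLoopB_succ_true (fuel : Nat) (cs : List Char) (rem : List Bool)
    (cnt : PySem.Dict Char Int) (l rpo : Nat) :
    rrLoopB (fuel + 1) cs rem cnt l rpo true =
      match rrScanLB cnt cs rem l rpo with
      | some i =>
          rrLoopB fuel cs (rem.set i true)
            (cnt.insert (cs.getD i ' ') (cnt.getD (cs.getD i ' ') 0 - 1)) i rpo false
      | none => rem := rfl

theorem rrLoopB_succ_false (fuel : Nat) (cs : List Char) (rem : List Bool)
    (cnt : PySem.Dict Char Int) (l rpo : Nat) :
    rrLoopB (fuel + 1) cs rem cnt l rpo false =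
      match rrScanRB cnt cs rem l rpo with
      | some j =>
          rrLoopB fuel cs (rem.set j true)
            (cnt.insert (cs.getD j ' ') (cnt.getD (cs.getD j ' ') 0 - 1)) l (j + 1) true
      | none => rem := rfl

theorem rrLoop_eq (cs : List Char) (fuel : Nat) :
    ∀ (rem : List Bool) (cnt : PySem.Dict Char Int) (l rpo : Nat) (dir : Bool),
    rem.length = cs.length → l ≤ rpo → rpo ≤ cs.length →
    rrLoopA fuel (rrJoinKept cs rem) cnt (rrCF rem l) (rrCF rem rpo) dir
      = rrJoinKept cs (rrLoopB fuel cs rem cnt l rpo dir) := by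
  induction fuel with
  | zero => intro rem cnt l rpo dir _ _ _; rfl
  | succ fuel ih =>
    intro rem cnt l rpo dir hlen hlr hr
    cases dir with
    | true =>
      rcases rrScanL_eq cnt cs rem hlen rpo hr rpo l (by omega) with
        ⟨hB, hA⟩ | ⟨i, hB, hli, hirpo, hifalse, hA⟩
      · rw [rrLoopA_succ_true, rrLoopB_succ_true, hA, hB]
      · have hicst : i < cs.length := lt_of_lt_of_le hirpo hr
        have hirem : i < rem.length := hlen ▸ hicst
        have hchar := rrKept_getD cs rem hlen hicst hifalse ' '
        have hset1 : rrCF rem i = rrCF (rem.set i true) i := (rrCF_set_le rem le_rfl).symm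
        have hset2 : rrCF rem rpo - 1 = rrCF (rem.set i true) rpo :=
          (rrCF_set_gt rem hirem hirpo hifalse).symm
        rw [rrLoopA_succ_true, rrLoopB_succ_true, hA, hB]
        show rrLoopA fuel ((rrJoinKept cs rem).eraseIdx (rrCF rem i))
              (cnt.insert ((rrJoinKept cs rem).getD (rrCF rem i) ' ')
                (cnt.getD ((rrJoinKept cs rem).getD (rrCF rem i) ' ') 0 - 1))
              (rrCF rem i) (rrCF rem rpo - 1) false
            = rrJoinKept cs (rrLoopB fuel cs (rem.set i true)
                (cnt.insert (cs.getD i ' ') (cnt.getD (cs.getD i ' ') 0 - 1)) i rpo false)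
        rw [hchar, ← rrKept_set cs rem hlen hicst hifalse, hset1, hset2]
        exact ih (rem.set i true) _ i rpo false (by simp [hlen]) (le_of_lt hirpo) hr
    | false =>
      rcases rrScanR_eq cnt cs rem hlen l rpo rpo hr (by omega) with
        ⟨hB, hA⟩ | ⟨j, hB, hlj, hjrpo, hjfalse, hA⟩
      · rw [rrLoopA_succ_false, rrLoopB_succ_false, hA, hB]
      · have hjcst : j < cs.length := lt_of_lt_of_le hjrpo hr
        have hjrem : j < rem.length := hlen ▸ hjcst
        have hchar := rrKept_getD cs rem hlen hjcst hjfalse ' '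
        have hset1 : rrCF rem l = rrCF (rem.set j true) l := (rrCF_set_le rem hlj).symm
        have hset2 : rrCF rem j = rrCF (rem.set j true) (j + 1) := by
          rw [rrCF_set_gt rem hjrem (Nat.lt_succ_self j) hjfalse,
            rrCF_succ_false rem hjrem hjfalse]
          omega
        rw [rrLoopA_succ_false, rrLoopB_succ_false, hA, hB]
        show rrLoopA fuel ((rrJoinKept cs rem).eraseIdx (rrCF rem j))
              (cnt.insert ((rrJoinKept cs rem).getD (rrCF rem j) ' ')
                (cnt.getD ((rrJoinKept cs rem).getD (rrCF rem j) ' ') 0 - 1))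
              (rrCF rem l) (rrCF rem j) true
            = rrJoinKept cs (rrLoopB fuel cs (rem.set j true)
                (cnt.insert (cs.getD j ' ') (cnt.getD (cs.getD j ' ') 0 - 1)) l (j + 1) true)
        rw [hchar, ← rrKept_set cs rem hlen hjcst hjfalse, hset1, hset2]
        exact ih (rem.set j true) _ l (j + 1) true (by simp [hlen]) (by omega) (by omega)

theorem rrJoinKept_replicate (cs : List Char) :
    rrJoinKept cs (List.replicate cs.length false) = cs := by
  induction cs with
  | nil => rfl
  | cons c cs ih => simp [rrJoinKept, List.replicate_succ, ih]

-- ===== VERDICT (by name: the statement is the Claim_ definition above) =====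
theorem removeReverse_spec : Claim_equal_removeReverse := by
  intro S _
  unfold Spec_removeReverse removeReverse removeReverse_alt
  dsimp only
  rw [PySem.Dict.foldl_insert_getD_add_one_eq_counter]
  have h0 : rrCF (List.replicate S.toList.length false) 0 = 0 := rrCF_zero _
  have hn : rrCF (List.replicate S.toList.length false) S.toList.length = S.toList.length := by
    simp [rrCF]
  have hloop := rrLoop_eq S.toList (S.toList.length + 1) (List.replicate S.toList.length false)
    (PySem.Dict.counter S.toList) 0 S.toList.length true (by simp) (Nat.zero_le _) le_rfl
  rw [rrJoinKept_replicate, h0, hn] at hloop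
  rw [hloop]
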